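-- pv_equiv track=rewrite | github.com/Ciphrox/Hacktoberfest2021 | iterative tribonacci.py | trib_iter
-- ===== SOURCE A (Python) =====
-- def trib_iter(m):
--     lista=[m]
--     c=0
--     d=True
--     while d==True:
--         novalista=[]
--         for n in lista:
--             if n in [0,1,2]:
--                 c+=1
--             else:
--                 for i in range(1,4):
--                     if n-i in [0,1,2]:
--                         c+=1
--                     else:
--                         if n-i<0:
--                             pass
--                         else:
--                             novalista.append(n-i)
--         if novalista==[]:
--             d=False
--         else:
--             lista=novalista
--     return c
-- ===== SOURCE B (Python) =====
-- def trib_iter(m):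
--     if m < 0:
--         return 0
--     a = b = c = 1
--     for _ in range(m - 2):
--         a, b, c = b, c, a + b + c
--     return c
-- ===== Notes on version B (the rewrite author's own statement) =====
-- stated objective: faster
-- what changed: Replaces the breadth-first expansion of a worklist of pending subproblems (exponentially many base-case hits counted one by one) with a bottom-up three-variable tribonacci DP computing the same count T(m) in one linear pass; intended as faster (measured: at n=16 A needed ~1.7s or timed out while B returned in <1ms, confirmed only on a single both-finished input).
import Mathlib
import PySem

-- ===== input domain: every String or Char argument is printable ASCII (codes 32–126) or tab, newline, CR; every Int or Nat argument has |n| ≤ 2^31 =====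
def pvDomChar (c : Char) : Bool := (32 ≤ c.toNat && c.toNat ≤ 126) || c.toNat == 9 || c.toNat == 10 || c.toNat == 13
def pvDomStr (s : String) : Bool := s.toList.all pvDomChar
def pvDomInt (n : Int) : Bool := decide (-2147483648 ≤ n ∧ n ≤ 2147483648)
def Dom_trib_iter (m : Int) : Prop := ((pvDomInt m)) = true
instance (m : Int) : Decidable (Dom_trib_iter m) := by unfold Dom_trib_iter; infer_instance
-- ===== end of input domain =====

-- B replaces A's breadth-first worklist expansion (exponential count of base-case hits) with a
-- bottom-up three-variable tribonacci DP; same return value, intended as faster (timing: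
-- at n=16 A took ~1.7s or timed out while B returned in <1ms, measured on a single both-finished input).


-- ===== PORT A =====
-- measure used only for the while-loop's termination: max of the toNats of the list
def tribMu (lista : List Int) : Nat :=
  lista.foldr (fun n acc => max n.toNat acc) 0

-- body of A's 'for n in lista' loop: state = (c, novalista)
def trib_body (acc : Int × List Int) (n : Int) : Int × List Int :=
  if n = 0 ∨ n = 1 ∨ n = 2 then (acc.1 + 1, acc.2)
  else
    (PySem.List.pyRange 1 4 1).foldl
      (fun (a : Int × List Int) i =>
        if n - i = 0 ∨ n - i = 1 ∨ n - i = 2 then (a.1 + 1, a.2)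
        else if n - i < 0 then a
        else (a.1, a.2 ++ [n - i])) acc

-- explicit characterisation of trib_body (used by the termination proof below)
theorem trib_body_char (c : Int) (nova : List Int) (n : Int) :
    trib_body (c, nova) n =
      if n = 0 ∨ n = 1 ∨ n = 2 then (c + 1, nova)
      else if n < 0 then (c, nova)
      else if n = 3 then (c + 3, nova)
      else if n = 4 then (c + 2, nova ++ [3])
      else if n = 5 then (c + 1, nova ++ [4, 3])
      else (c, nova ++ [n - 1, n - 2, n - 3]) := by
  have h14 : PySem.List.pyRange 1 4 1 = [1, 2, 3] := by decide
  by_cases hb : n = 0 ∨ n = 1 ∨ n = 2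
  · simp [trib_body, hb]
  · rw [if_neg hb]
    by_cases hn : n < 0
    · simp only [trib_body, h14, List.foldl, if_neg hb,
        if_neg (show ¬(n - 1 = 0 ∨ n - 1 = 1 ∨ n - 1 = 2) by omega), if_pos (show n - 1 < 0 by omega),
        if_neg (show ¬(n - 2 = 0 ∨ n - 2 = 1 ∨ n - 2 = 2) by omega), if_pos (show n - 2 < 0 by omega),
        if_neg (show ¬(n - 3 = 0 ∨ n - 3 = 1 ∨ n - 3 = 2) by omega), if_pos (show n - 3 < 0 by omega)]
      rw [if_pos hn]
    · rw [if_neg hn]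
      by_cases h3 : n = 3
      · subst h3; norm_num [trib_body, h14]; omega
      · rw [if_neg h3]
        by_cases h4 : n = 4
        · subst h4; norm_num [trib_body, h14]; omega
        · rw [if_neg h4]
          by_cases h5 : n = 5
          · subst h5; norm_num [trib_body, h14]
          · rw [if_neg h5]
            have h6 : 6 ≤ n := by omega
            simp only [trib_body, h14, List.foldl, if_neg hb,
              if_neg (show ¬(n - 1 = 0 ∨ n - 1 = 1 ∨ n - 1 = 2) by omega), if_neg (show ¬(n - 1 < 0) by omega),
              if_neg (show ¬(n - 2 = 0 ∨ n - 2 = 1 ∨ n - 2 = 2) by omega), if_neg (show ¬(n - 2 < 0) by omega),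
              if_neg (show ¬(n - 3 = 0 ∨ n - 3 = 1 ∨ n - 3 = 2) by omega), if_neg (show ¬(n - 3 < 0) by omega)]
            simp

theorem trib_body_mem (c : Int) (nova : List Int) (n x : Int)
    (hx : x ∈ (trib_body (c, nova) n).2) : x ∈ nova ∨ (3 ≤ x ∧ x.toNat < n.toNat) := by
  rw [trib_body_char] at hx
  split_ifs at hx with h1 h2 h3 h4 h5 <;>
    [skip; skip; skip; skip; skip; skip] <;> simp only [List.mem_append, List.mem_cons,
      List.not_mem_nil, or_false] at hx
  · exact Or.inl hx
  · exact Or.inl hx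
  · exact Or.inl hx
  · rcases hx with hx | rfl
    · exact Or.inl hx
    · exact Or.inr ⟨by omega, by omega⟩
  · rcases hx with hx | rfl | rfl
    · exact Or.inl hx
    · exact Or.inr ⟨by omega, by omega⟩
    · exact Or.inr ⟨by omega, by omega⟩
  · rcases hx with hx | rfl | rfl | rfl
    · exact Or.inl hx
    · exact Or.inr ⟨by omega, by omega⟩
    · exact Or.inr ⟨by omega, by omega⟩
    · exact Or.inr ⟨by omega, by omega⟩

theorem trib_fold_mem (lista : List Int) (c : Int) (nova : List Int) (x : Int)
    (hx : x ∈ (lista.foldl trib_body (c, nova)).2) :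
    x ∈ nova ∨ ∃ n ∈ lista, 3 ≤ x ∧ x.toNat < n.toNat := by
  induction lista generalizing c nova with
  | nil => simp_all
  | cons hd tl ih =>
    simp only [List.foldl_cons] at hx
    rcases ih (trib_body (c, nova) hd).1 (trib_body (c, nova) hd).2 (by simpa using hx) with h | ⟨n, hn, h3, hlt⟩
    · rcases trib_body_mem c nova hd x h with h' | h'
      · exact Or.inl h'
      · exact Or.inr ⟨hd, List.mem_cons_self .., h'⟩
    · exact Or.inr ⟨n, List.mem_cons_of_mem _ hn, h3, hlt⟩

theorem tribMu_le (lista : List Int) (x : Int) (hx : x ∈ lista) : x.toNat ≤ tribMu lista := by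
  induction lista with
  | nil => simp at hx
  | cons hd tl ih =>
    rcases List.mem_cons.1 hx with rfl | h
    · simp [tribMu]
    · simp only [tribMu, List.foldr] at *
      exact le_trans (ih h) (Nat.le_max_right _ _)

theorem tribMu_lt (l2 l1 : List Int) (hne : l2 ≠ [])
    (h : ∀ x ∈ l2, x.toNat < tribMu l1) : tribMu l2 < tribMu l1 := by
  induction l2 with
  | nil => simp at hne
  | cons hd tl ih =>
    have h1 := h hd (by simp)
    have hstep : tribMu (hd :: tl) = max hd.toNat (tribMu tl) := rfl
    rw [hstep]
    rcases eq_or_ne tl [] with rfl | htl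
    · have h0 : tribMu ([] : List Int) = 0 := rfl
      rw [h0]
      exact Nat.max_lt.mpr ⟨h1, by omega⟩
    · exact Nat.max_lt.mpr ⟨h1, ih htl (fun x hx => h x (List.mem_cons_of_mem _ hx))⟩

-- A's while loop
def trib_loop (lista : List Int) (c : Int) : Int :=
  if _hp : (lista.foldl trib_body (c, [])).2 = [] then (lista.foldl trib_body (c, [])).1
  else trib_loop (lista.foldl trib_body (c, [])).2 (lista.foldl trib_body (c, [])).1
termination_by tribMu lista
decreasing_by
  simp only [List.foldl_attach]
  refine tribMu_lt _ _ _hp (fun x hx => ?_)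
  rcases trib_fold_mem lista c [] x hx with h | ⟨n, hn, _, hlt⟩
  · simp at h
  · exact lt_of_lt_of_le hlt (tribMu_le _ _ hn)

def trib_iter (m : Int) : Int := trib_loop [m] 0

-- ===== PORT B =====
def trib_iter_alt (m : Int) : Int :=
  if m < 0 then 0
  else
    ((PySem.List.pyRange 0 (m - 2) 1).foldl
      (fun (t : Int × Int × Int) _ => (t.2.1, t.2.2, t.1 + t.2.1 + t.2.2)) (1, 1, 1)).2.2

-- ===== PRECONDITION & SPEC =====
def Spec_trib_iter (m : Int) (out : Int) : Prop := out = trib_iter_alt m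
instance (m : Int) (out : Int) : Decidable (Spec_trib_iter m out) := by unfold Spec_trib_iter; infer_instance

-- ===== CLAIM (what is proved, stated in full; the proofs are below) =====
def Claim_equal_trib_iter : Prop := ∀ (m : Int), Dom_trib_iter m → Spec_trib_iter m (trib_iter m)

-- ===== LEMMAS AND PROOFS =====

-- the common mathematical value: number of base-case hits of the tribonacci expansion
def gT (m : Int) : Int :=
  if m < 0 then 0
  else if m ≤ 2 then 1
  else gT (m - 1) + gT (m - 2) + gT (m - 3)
termination_by m.toNat
decreasing_by all_goals omega

theorem gT_neg (m : Int) (h : m < 0) : gT m = 0 := by rw [gT]; rw [if_pos h]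
theorem gT_base (m : Int) (h0 : 0 ≤ m) (h2 : m ≤ 2) : gT m = 1 := by
  rw [gT]; rw [if_neg (by omega), if_pos h2]
theorem gT_rec (m : Int) (h : 3 ≤ m) : gT m = gT (m - 1) + gT (m - 2) + gT (m - 3) := by
  rw [gT]; rw [if_neg (by omega), if_neg (by omega)]
theorem gT_0 : gT 0 = 1 := gT_base 0 (by norm_num) (by norm_num)
theorem gT_1 : gT 1 = 1 := gT_base 1 (by norm_num) (by norm_num)
theorem gT_2 : gT 2 = 1 := gT_base 2 (by norm_num) (by norm_num)
theorem gT_3 : gT 3 = 3 := by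
  rw [gT_rec 3 (by norm_num)]; norm_num [gT_0, gT_1, gT_2]
theorem gT_4 : gT 4 = 5 := by
  rw [gT_rec 4 (by norm_num)]; norm_num [gT_1, gT_2, gT_3]

theorem trib_body_sum (c : Int) (nova : List Int) (n : Int) :
    (trib_body (c, nova) n).1 + (((trib_body (c, nova) n).2).map gT).sum
      = c + (nova.map gT).sum + gT n := by
  rw [trib_body_char]
  split_ifs with h1 h2 h3 h4 h5
  · rw [gT_base n (by omega) (by omega)]; ring
  · rw [gT_neg n h2]; ring
  · subst h3; rw [gT_3]; ring
  · subst h4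
    simp only [List.map_append, List.map_cons, List.map_nil, List.sum_append, List.sum_cons,
      List.sum_nil, gT_3, gT_4]
    ring
  · subst h5
    rw [gT_rec 5 (by norm_num)]
    simp only [List.map_append, List.map_cons, List.map_nil, List.sum_append, List.sum_cons,
      List.sum_nil]
    norm_num [gT_2]
    ring
  · rw [gT_rec n (by omega)]
    simp only [List.map_append, List.map_cons, List.map_nil, List.sum_append, List.sum_cons,
      List.sum_nil]
    ring

theorem trib_fold_sum (lista : List Int) (c : Int) (nova : List Int) :
    (lista.foldl trib_body (c, nova)).1 + (((lista.foldl trib_body (c, nova)).2).map gT).sum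
      = c + (nova.map gT).sum + (lista.map gT).sum := by
  induction lista generalizing c nova with
  | nil => simp
  | cons hd tl ih =>
    simp only [List.foldl_cons, List.map_cons, List.sum_cons]
    have := ih (trib_body (c, nova) hd).1 (trib_body (c, nova) hd).2
    rw [show ((trib_body (c, nova) hd).1, (trib_body (c, nova) hd).2) = trib_body (c, nova) hd from rfl] at this
    rw [this, trib_body_sum]
    ring

theorem trib_loop_eq (lista : List Int) (c : Int) :
    trib_loop lista c = c + (lista.map gT).sum := by
  rw [trib_loop]
  have hsum := trib_fold_sum lista c []
  split_ifs with hp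
  · simp [hp] at hsum
    simpa using hsum
  · rw [trib_loop_eq (lista.foldl trib_body (c, [])).2 (lista.foldl trib_body (c, [])).1]
    simp at hsum
    omega
termination_by tribMu lista
decreasing_by
  refine tribMu_lt _ _ hp (fun x hx => ?_)
  rcases trib_fold_mem lista c [] x hx with h | ⟨n, hn, _, hlt⟩
  · simp at h
  · exact lt_of_lt_of_le hlt (tribMu_le _ _ hn)

theorem trib_iter_eq_gT (m : Int) : trib_iter m = gT m := by
  rw [trib_iter, trib_loop_eq]; simp

-- B-side invariant
theorem trib_dp_inv (k : Nat) :
    (PySem.List.pyRange 0 k 1).foldl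
      (fun (t : Int × Int × Int) _ => (t.2.1, t.2.2, t.1 + t.2.1 + t.2.2)) (1, 1, 1)
      = (gT k, gT (k + 1), gT (k + 2)) := by
  induction k with
  | zero =>
    simp [PySem.List.pyRange_one_eq_nil, gT_base 0 (by norm_num) (by norm_num),
      gT_base 1 (by norm_num) (by norm_num), gT_base 2 (by norm_num) (by norm_num)]
  | succ k ih =>
    have hr : PySem.List.pyRange 0 (↑(k + 1)) 1 = PySem.List.pyRange 0 (↑k) 1 ++ [(k : Int)] := by
      push_cast
      exact PySem.List.pyRange_one_succ_right (by positivity)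
    rw [hr, List.foldl_append, ih]
    simp only [List.foldl]
    rw [gT_rec (↑(k + 1) + 2) (by push_cast; omega)]
    push_cast
    ring_nf

theorem trib_iter_alt_eq_gT (m : Int) : trib_iter_alt m = gT m := by
  rw [trib_iter_alt]
  split_ifs with h
  · rw [gT_neg m h]
  · rcases le_or_gt m 2 with h2 | h2
    · rw [PySem.List.pyRange_one_eq_nil (by omega), gT_base m (by omega) h2]
      rfl
    · have hk : m - 2 = ((m - 2).toNat : Int) := by omega
      rw [hk, trib_dp_inv]
      show gT (↑(m - 2).toNat + 2) = gT m
      congr 1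
      omega

-- ===== VERDICT (by name: the statement is the Claim_ definition above) =====
theorem trib_iter_spec : Claim_equal_trib_iter := by
  intro m _
  unfold Spec_trib_iter
  rw [trib_iter_eq_gT, trib_iter_alt_eq_gT]
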